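-- pv_equiv track=rewrite | github.com/ehddud8339/ldy | logs/vmstat_xlsx_summary.py | diff_vmstat
-- ===== SOURCE A (Python) =====
-- def diff_vmstat(before, after):
--     """
--     before/after dict를 받아 after - before diff dict로 변환
--     """
--     diff = {}
--     keys = set(before.keys()) | set(after.keys())
--     for k in keys:
--         b = before.get(k, 0)
--         a = after.get(k, 0)
--         diff[k] = a - b
--     return diff
-- ===== SOURCE B (Python) =====
-- def diff_vmstat(before, after):
--     """
--     before/after dict를 받아 after - before diff dict로 변환
--     """
--     rest = dict(after)
--     diff = {}
--     for k, b in before.items():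
--         diff[k] = rest.pop(k, 0) - b
--     diff.update(rest)
--     return diff
-- ===== Notes on version B (the rewrite author's own statement) =====
-- stated objective: alternative
-- what changed: B builds no key-union set and never looks keys up in after: it destructively consumes a residual copy of after (rest.pop(k, 0)) while scanning before once, so matched keys disappear from the residual, and the leftover residual - exactly the after-only keys - is spliced in with one dict.update.
import Mathlib
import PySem

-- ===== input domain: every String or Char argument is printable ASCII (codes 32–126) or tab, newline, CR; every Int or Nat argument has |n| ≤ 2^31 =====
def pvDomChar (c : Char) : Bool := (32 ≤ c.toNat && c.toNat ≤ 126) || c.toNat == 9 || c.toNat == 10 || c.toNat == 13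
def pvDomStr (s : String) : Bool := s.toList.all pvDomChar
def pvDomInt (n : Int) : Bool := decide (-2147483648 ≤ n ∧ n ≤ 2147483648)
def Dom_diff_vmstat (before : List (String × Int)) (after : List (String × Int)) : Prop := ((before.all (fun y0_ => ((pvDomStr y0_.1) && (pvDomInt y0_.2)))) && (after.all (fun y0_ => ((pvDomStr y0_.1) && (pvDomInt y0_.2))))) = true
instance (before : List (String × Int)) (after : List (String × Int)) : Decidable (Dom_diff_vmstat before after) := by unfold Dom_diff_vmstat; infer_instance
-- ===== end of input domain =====

-- B replaces A's key-union pass by destructive consumption: it scans before once, popping each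
-- matched key out of a residual copy of after, then splices the leftover residual in with one update.
-- A's dict output is compared ignoring order; the ports realise one fixed (first-insertion) order for both.

-- ===== PORT A =====
def diff_vmstat (before : List (String × Int)) (after : List (String × Int)) : List (String × Int) :=
  let bD := PySem.Dict.mk before
  let aD := PySem.Dict.mk after
  let keys := PySem.Set.union (PySem.Set.ofList bD.keys) (PySem.Set.ofList aD.keys)
  (keys.foldl (fun d k =>
      let b := bD.getD k 0
      let a := aD.getD k 0
      d.insert k (a - b)) (PySem.Dict.mk [])).items

-- ===== PORT B =====
def diff_vmstat_alt (before : List (String × Int)) (after : List (String × Int)) : List (String × Int) :=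
  -- state: (diff, rest); rest starts as a copy of after and each rest.pop(k, 0) removes k from it
  let st := before.foldl
    (fun (s : PySem.Dict String Int × PySem.Dict String Int) kv =>
      let pr := match s.2.pop? kv.1 with
                | some (v, r) => (v, r)      -- rest.pop(k, 0): value found, key removed
                | none => ((0 : Int), s.2)   -- default 0, rest unchanged
      (s.1.insert kv.1 (pr.1 - kv.2), pr.2))
    (PySem.Dict.mk [], PySem.Dict.mk after)
  (st.1.update st.2.items).items

-- ===== PRECONDITION & SPEC =====
-- The Python arguments are dicts, whose keys are unique by construction; an association list with
-- a duplicated key represents no Python dict, so Pre_ restricts to assoc lists with pairwise-distinct keys.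
def Pre_diff_vmstat (before : List (String × Int)) (after : List (String × Int)) : Prop :=
  (before.map Prod.fst).Nodup ∧ (after.map Prod.fst).Nodup
instance (before : List (String × Int)) (after : List (String × Int)) : Decidable (Pre_diff_vmstat before after) := by unfold Pre_diff_vmstat; infer_instance

def pvWitness_diff_vmstat : (List (String × Int)) × (List (String × Int)) :=
  ([("cpu", 3), ("io", 5)], [("io", 9), ("mem", 2)])

def Spec_diff_vmstat (before : List (String × Int)) (after : List (String × Int)) (out : List (String × Int)) : Prop := out = diff_vmstat_alt before after
instance (before : List (String × Int)) (after : List (String × Int)) (out : List (String × Int)) : Decidable (Spec_diff_vmstat before after out) := by unfold Spec_diff_vmstat; infer_instance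

-- ===== CLAIM (what is proved, stated in full; the proofs are below) =====
def Claim_equal_diff_vmstat : Prop := ∀ (before : List (String × Int)) (after : List (String × Int)), Dom_diff_vmstat before after → Pre_diff_vmstat before after → Spec_diff_vmstat before after (diff_vmstat before after)

-- ===== LEMMAS AND PROOFS =====

-- first-match lookup in an assoc list with distinct keys finds the pair itself
theorem pv_getD_mk_of_mem {l : List (String × Int)} {p : String × Int}
    (hnd : (l.map Prod.fst).Nodup) (hp : p ∈ l) :
    (PySem.Dict.mk l).getD p.1 0 = p.2 := by
  induction l with
  | nil => cases hp
  | cons q l ih =>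
    simp only [List.map_cons, List.nodup_cons] at hnd
    rcases List.mem_cons.1 hp with h | h
    · subst h
      simp [PySem.Dict.getD, PySem.Dict.get?, List.find?]
    · have hne : p.1 ≠ q.1 := by
        intro he
        exact hnd.1 (he ▸ List.mem_map_of_mem (f := Prod.fst) h)
      have : (q.1 == p.1) = false := by
        simp [beq_eq_false_iff_ne]; exact fun he => hne he.symm
      simp only [PySem.Dict.getD, PySem.Dict.get?, List.find?, this]
      exact ih hnd.2 h

-- lookup of an absent key yields the default
theorem pv_getD_mk_of_not_mem {l : List (String × Int)} {k : String}
    (hk : k ∉ l.map Prod.fst) : (PySem.Dict.mk l).getD k 0 = 0 := by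
  induction l with
  | nil => rfl
  | cons q l ih =>
    simp only [List.map_cons, List.mem_cons, not_or] at hk
    have : (q.1 == k) = false := by simp [beq_eq_false_iff_ne]; exact fun h => hk.1 h.symm
    simp only [PySem.Dict.getD, PySem.Dict.get?, List.find?, this]
    exact ih hk.2

theorem pv_contains_iff {d : PySem.Dict String Int} {k : String} :
    d.contains k = true ↔ k ∈ d.items.map Prod.fst := by
  simp only [PySem.Dict.contains, List.any_eq_true, List.mem_map]
  constructor
  · rintro ⟨p, hp, h⟩; exact ⟨p, hp, eq_of_beq h⟩
  · rintro ⟨p, hp, h⟩; exact ⟨p, hp, beq_iff_eq.2 h⟩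

-- folding inserts of pairwise-distinct fresh keys appends them in order
theorem pv_fold_insert_fresh {α : Type} (key : α → String) (val : α → Int) :
    ∀ (xs : List α) (d : PySem.Dict String Int),
      (xs.map key).Nodup → (∀ x ∈ xs, d.contains (key x) = false) →
      (xs.foldl (fun d x => d.insert (key x) (val x)) d).items
        = d.items ++ xs.map (fun x => (key x, val x)) := by
  intro xs
  induction xs with
  | nil => intro d _ _; simp
  | cons x xs ih =>
    intro d hnd hfresh
    simp only [List.map_cons, List.nodup_cons] at hnd
    simp only [List.foldl_cons]
    have hcx : d.contains (key x) = false := hfresh x (List.mem_cons_self ..)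
    have hins : (d.insert (key x) (val x)).items = d.items ++ [(key x, val x)] := by
      simp [PySem.Dict.insert, hcx]
    have hfresh' : ∀ y ∈ xs, (d.insert (key x) (val x)).contains (key y) = false := by
      intro y hy
      have hne : key y ≠ key x := fun he => hnd.1 (he ▸ List.mem_map_of_mem (f := key) hy)
      rw [PySem.Dict.contains_insert]
      simp [hne, hfresh y (List.mem_cons_of_mem _ hy)]
    rw [ih _ hnd.2 hfresh', hins]
    simp

-- Python's rest.pop(k, 0) as one equation: the looked-up value and the key-erased residual
theorem pv_pop_step (rest : PySem.Dict String Int) (k : String) :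
    (match rest.pop? k with
      | some (v, r) => (v, r)
      | none => ((0 : Int), rest)) = (rest.getD k 0, rest.erase k) := by
  cases hg : rest.get? k with
  | some v =>
    simp [PySem.Dict.pop?, hg, PySem.Dict.getD_eq_get?_getD]
  | none =>
    have herase : rest.erase k = rest := by
      apply PySem.Dict.ext
      simp only [PySem.Dict.erase]
      apply List.filter_eq_self.2
      intro p hp
      simp only [Bool.not_eq_eq_eq_not]
      rcases hb : (p.1 == k) with _ | _
      · rfl
      · exfalso
        have hk : k ∈ rest.items.map Prod.fst :=
          (eq_of_beq hb) ▸ List.mem_map_of_mem (f := Prod.fst) hp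
        have := pv_contains_iff.2 hk
        rw [PySem.Dict.contains_eq_isSome_get?, hg] at this
        cases this
    simp [PySem.Dict.pop?, hg, PySem.Dict.getD_eq_get?_getD, herase]

-- B's loop body, with the pop unfolded into lookup + erase
theorem pv_step_eq :
    (fun (s : PySem.Dict String Int × PySem.Dict String Int) (kv : String × Int) =>
      let pr := match s.2.pop? kv.1 with
                | some (v, r) => (v, r)
                | none => ((0 : Int), s.2)
      (s.1.insert kv.1 (pr.1 - kv.2), pr.2))
    = (fun (s : PySem.Dict String Int × PySem.Dict String Int) (kv : String × Int) =>
        (s.1.insert kv.1 (s.2.getD kv.1 0 - kv.2), s.2.erase kv.1)) := by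
  funext s kv
  rw [show (match s.2.pop? kv.1 with
      | some (v, r) => (v, r)
      | none => ((0 : Int), s.2)) = (s.2.getD kv.1 0, s.2.erase kv.1) from pv_pop_step s.2 kv.1]

-- erasing a different key does not change a lookup
theorem pv_getD_erase_ne (rest : PySem.Dict String Int) {k k' : String} (h : k' ≠ k) :
    (rest.erase k).getD k' 0 = rest.getD k' 0 := by
  simp only [PySem.Dict.getD, PySem.Dict.get?, PySem.Dict.erase]
  rw [List.find?_filter]
  have hpred : (fun a : String × Int => decide ((!a.1 == k) = true ∧ (a.1 == k') = true))
      = fun p : String × Int => p.1 == k' := by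
    funext a
    by_cases ha : a.1 = k'
    · simp [ha, h]
    · simp [ha]
  rw [hpred]

-- the residual after erasing every key of ks keeps exactly the pairs whose key is outside ks
theorem pv_erase_fold (bs : List (String × Int)) :
    ∀ d : PySem.Dict String Int,
      (bs.foldl (fun r kv => r.erase kv.1) d).items
        = d.items.filter (fun kv => decide (kv.1 ∉ bs.map Prod.fst)) := by
  induction bs with
  | nil => intro d; simp
  | cons kv bs ih =>
    intro d
    simp only [List.foldl_cons]
    rw [ih]
    simp only [PySem.Dict.erase, List.filter_filter]
    apply List.filter_congr
    intro p _
    by_cases h1 : p.1 = kv.1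
    · simp [h1]
    · by_cases h2 : p.1 ∈ bs.map Prod.fst <;> simp [h1, h2]

-- B's main loop: diff collects the before pairs in order, rest loses exactly the before keys
theorem pv_B_fold (bs : List (String × Int)) :
    ∀ (d0 rest : PySem.Dict String Int),
      (bs.map Prod.fst).Nodup → (∀ kv ∈ bs, d0.contains kv.1 = false) →
      bs.foldl
        (fun (s : PySem.Dict String Int × PySem.Dict String Int) kv =>
          (s.1.insert kv.1 (s.2.getD kv.1 0 - kv.2), s.2.erase kv.1))
        (d0, rest)
        = (PySem.Dict.mk (d0.items ++ bs.map (fun kv => (kv.1, rest.getD kv.1 0 - kv.2))),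
           bs.foldl (fun r kv => r.erase kv.1) rest) := by
  induction bs with
  | nil =>
    intro d0 rest _ _
    simp
  | cons kv bs ih =>
    intro d0 rest hnd hfresh
    simp only [List.map_cons, List.nodup_cons] at hnd
    simp only [List.foldl_cons]
    have hcx : d0.contains kv.1 = false := hfresh kv (List.mem_cons_self ..)
    have hins : d0.insert kv.1 (rest.getD kv.1 0 - kv.2)
        = PySem.Dict.mk (d0.items ++ [(kv.1, rest.getD kv.1 0 - kv.2)]) := by
      apply PySem.Dict.ext
      simp [PySem.Dict.insert, hcx]
    have hfresh' : ∀ kv' ∈ bs,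
        (PySem.Dict.mk (d0.items ++ [(kv.1, rest.getD kv.1 0 - kv.2)])).contains kv'.1 = false := by
      intro kv' hmem
      rw [← hins, PySem.Dict.contains_insert]
      have hne : kv'.1 ≠ kv.1 := fun he => hnd.1 (he ▸ List.mem_map_of_mem (f := Prod.fst) hmem)
      simp [hne, hfresh kv' (List.mem_cons_of_mem _ hmem)]
    show (bs.foldl _ (d0.insert kv.1 (rest.getD kv.1 0 - kv.2), rest.erase kv.1)) = _
    rw [hins, ih _ _ hnd.2 hfresh']
    have hmap : bs.map (fun kv' => (kv'.1, (rest.erase kv.1).getD kv'.1 0 - kv'.2))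
        = bs.map (fun kv' => (kv'.1, rest.getD kv'.1 0 - kv'.2)) := by
      apply List.map_congr_left
      intro kv' hmem
      have hne : kv'.1 ≠ kv.1 := fun he => hnd.1 (he ▸ List.mem_map_of_mem (f := Prod.fst) hmem)
      rw [pv_getD_erase_ne rest hne]
    rw [hmap]
    simp

-- both programs compute before-keys first (updated), then after's fresh keys appended
theorem pv_A_normal (before after : List (String × Int))
    (hb : (before.map Prod.fst).Nodup) (ha : (after.map Prod.fst).Nodup) :
    diff_vmstat before after
      = before.map (fun kv => (kv.1, (PySem.Dict.mk after).getD kv.1 0 - kv.2))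
        ++ after.filter (fun kv => !((before.map Prod.fst).contains kv.1)) := by
  unfold diff_vmstat
  show ((PySem.Set.union (PySem.Set.ofList (PySem.Dict.mk before).keys)
          (PySem.Set.ofList (PySem.Dict.mk after).keys)).foldl
      (fun d k => d.insert k ((PySem.Dict.mk after).getD k 0 - (PySem.Dict.mk before).getD k 0))
      (PySem.Dict.mk [])).items = _
  have hkb : PySem.Set.ofList ((PySem.Dict.mk before).keys) = before.map Prod.fst :=
    PySem.Set.ofList_eq_self_of_nodup _ hb
  have hka : PySem.Set.ofList ((PySem.Dict.mk after).keys) = after.map Prod.fst :=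
    PySem.Set.ofList_eq_self_of_nodup _ ha
  have hkeys : PySem.Set.union (PySem.Set.ofList ((PySem.Dict.mk before).keys))
        (PySem.Set.ofList ((PySem.Dict.mk after).keys))
      = before.map Prod.fst
        ++ (after.map Prod.fst).filter
             (fun y => !(PySem.Set.contains (before.map Prod.fst) y)) := by
    rw [hkb, hka]
    rw [show PySem.Set.union (before.map Prod.fst) (after.map Prod.fst)
        = PySem.Set.update (before.map Prod.fst) (after.map Prod.fst) from rfl]
    rw [PySem.Set.update_eq_append_filter]
    rw [PySem.Set.ofList_eq_self_of_nodup _ ha]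
  rw [hkeys]
  have hnd : ((before.map Prod.fst
      ++ (after.map Prod.fst).filter
           (fun y => !(PySem.Set.contains (before.map Prod.fst) y))).map (fun k : String => k)).Nodup := by
    simp only [List.map_id_fun', id]
    rw [List.nodup_append]
    refine ⟨hb, ha.filter _, ?_⟩
    intro x hx y hy hxy
    subst hxy
    have := List.of_mem_filter hy
    rw [Bool.not_eq_eq_eq_not, Bool.not_true] at this
    have : x ∉ before.map Prod.fst := fun hm => by
      rw [(PySem.Set.contains_iff _ _).2 hm] at this; cases this
    exact this hx
  have hfold := pv_fold_insert_fresh (fun k : String => k)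
    (fun k => (PySem.Dict.mk after).getD k 0 - (PySem.Dict.mk before).getD k 0)
    (before.map Prod.fst
      ++ (after.map Prod.fst).filter (fun y => !(PySem.Set.contains (before.map Prod.fst) y)))
    (PySem.Dict.mk []) hnd (fun x _ => rfl)
  beta_reduce at hfold
  rw [hfold]
  simp only [List.nil_append, List.map_append]
  congr 1
  · rw [List.map_map]
    apply List.map_congr_left
    intro kv hkv
    simp only [Function.comp]
    rw [pv_getD_mk_of_mem hb hkv]
  · rw [List.filter_map, List.map_map]
    have : ∀ kv ∈ after.filter
        ((fun y => !(PySem.Set.contains (before.map Prod.fst) y)) ∘ Prod.fst),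
        ((fun k => (k, (PySem.Dict.mk after).getD k 0 - (PySem.Dict.mk before).getD k 0)) ∘ Prod.fst) kv
          = kv := by
      intro kv hkv
      have hmem : kv ∈ after := List.mem_of_mem_filter hkv
      have hflt := List.of_mem_filter hkv
      simp only [Function.comp, Bool.not_eq_eq_eq_not, Bool.not_true] at hflt
      have hnotin : kv.1 ∉ before.map Prod.fst := fun hm => by
        rw [(PySem.Set.contains_iff _ _).2 hm] at hflt; cases hflt
      simp only [Function.comp]
      rw [pv_getD_mk_of_mem ha hmem, pv_getD_mk_of_not_mem hnotin, sub_zero]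
    rw [List.map_congr_left this]
    simp only [List.map_id']
    apply List.filter_congr
    intro kv _
    simp [Function.comp]

theorem pv_B_normal (before after : List (String × Int))
    (hb : (before.map Prod.fst).Nodup) (ha : (after.map Prod.fst).Nodup) :
    diff_vmstat_alt before after
      = before.map (fun kv => (kv.1, (PySem.Dict.mk after).getD kv.1 0 - kv.2))
        ++ after.filter (fun kv => !((before.map Prod.fst).contains kv.1)) := by
  unfold diff_vmstat_alt
  show (((before.foldl
      (fun (s : PySem.Dict String Int × PySem.Dict String Int) kv =>
        let pr := match s.2.pop? kv.1 with
                  | some (v, r) => (v, r)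
                  | none => ((0 : Int), s.2)
        (s.1.insert kv.1 (pr.1 - kv.2), pr.2))
      (PySem.Dict.mk [], PySem.Dict.mk after)).1.update
    (before.foldl
      (fun (s : PySem.Dict String Int × PySem.Dict String Int) kv =>
        let pr := match s.2.pop? kv.1 with
                  | some (v, r) => (v, r)
                  | none => ((0 : Int), s.2)
        (s.1.insert kv.1 (pr.1 - kv.2), pr.2))
      (PySem.Dict.mk [], PySem.Dict.mk after)).2.items).items) = _
  rw [pv_step_eq, pv_B_fold before (PySem.Dict.mk []) (PySem.Dict.mk after) hb (fun _ _ => rfl)]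
  simp only [PySem.Dict.update]
  rw [pv_erase_fold before (PySem.Dict.mk after)]
  set diffItems := before.map (fun kv => (kv.1, (PySem.Dict.mk after).getD kv.1 0 - kv.2)) with hdiff
  set restItems := (PySem.Dict.mk after).items.filter (fun kv => decide (kv.1 ∉ before.map Prod.fst)) with hrest
  have hrest' : restItems = after.filter (fun kv => decide (kv.1 ∉ before.map Prod.fst)) := hrest
  have hndRest : (restItems.map Prod.fst).Nodup := by
    rw [hrest']
    exact List.Nodup.sublist (List.Sublist.map Prod.fst List.filter_sublist) ha
  have hfresh : ∀ kv ∈ restItems,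
      (PySem.Dict.mk ((PySem.Dict.mk ([] : List (String × Int))).items ++ diffItems)).contains kv.1 = false := by
    intro kv hkv
    have hnm : kv.1 ∉ before.map Prod.fst := by
      have := List.of_mem_filter (hrest' ▸ hkv)
      simpa using this
    rcases hc : (PySem.Dict.mk ((PySem.Dict.mk ([] : List (String × Int))).items ++ diffItems)).contains kv.1 with _ | _
    · rfl
    · exfalso
      have hm := pv_contains_iff.1 hc
      simp only [List.nil_append] at hm
      rcases List.mem_map.1 hm with ⟨q, hq, hq1⟩
      rw [hdiff] at hq
      rcases List.mem_map.1 hq with ⟨p, hp, hpq⟩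
      have hp1 : p.1 = kv.1 := by rw [← hq1, ← hpq]
      exact hnm (hp1 ▸ List.mem_map_of_mem (f := Prod.fst) hp)
  have hfold := pv_fold_insert_fresh Prod.fst Prod.snd restItems
    (PySem.Dict.mk ((PySem.Dict.mk ([] : List (String × Int))).items ++ diffItems)) hndRest hfresh
  have hstep : (restItems.foldl (fun acc p => acc.insert p.1 p.2)
      (PySem.Dict.mk ((PySem.Dict.mk ([] : List (String × Int))).items ++ diffItems))).items
      = diffItems ++ restItems := by
    rw [hfold]
    simp
  rw [hstep]
  congr 1
  rw [hrest']
  apply List.filter_congr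
  intro kv _
  rcases hc : (before.map Prod.fst).contains kv.1 with _ | _
  · simp only [Bool.not_false, decide_eq_true_eq]
    intro hm
    rw [List.contains_iff_mem.2 hm] at hc
    cases hc
  · simp only [Bool.not_true, decide_eq_false_iff_not, Classical.not_not]
    exact List.contains_iff_mem.1 hc

-- ===== VERDICT (by name: the statement is the Claim_ definition above) =====
theorem diff_vmstat_spec : Claim_equal_diff_vmstat := by
  intro before after _ hpre
  obtain ⟨hb, ha⟩ := hpre
  unfold Spec_diff_vmstat
  rw [pv_A_normal before after hb ha, pv_B_normal before after hb ha]
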